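-- pv_equiv track=rewrite | github.com/SyNSec-den/hermes-spec-to-fsm | synthesizers/script_helpers.py | get_depending_sections
-- ===== SOURCE A (Python) =====
-- from typing import List
--
-- def get_depending_sections(section_num: str) -> List[str]:
--     results = []
--     if "_" not in section_num and section_num.isnumeric():
--         results.append(section_num)
--     else:
--         parts = section_num.split("_")
--         current = ""
--         for part in parts:
--             current = current + "_" + part
--             current = current.strip("_")
--             results.insert(0, current)
--
--     return results
-- ===== SOURCE B (Python) =====
-- from typing import List
--
-- def get_depending_sections(section_num: str) -> List[str]:
--     parts = section_num.split("_")
--     return ["_".join(p for p in parts[:i] if p) for i in range(len(parts), 0, -1)]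
-- ===== Notes on version B (the rewrite author's own statement) =====
-- stated objective: simpler
-- what changed: Replaced A's running-accumulator loop (repeated underscore-stripping plus insert at position 0, and the redundant numeric special case) by a single comprehension that joins the non-empty split parts of each prefix, longest first.
import Mathlib
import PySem

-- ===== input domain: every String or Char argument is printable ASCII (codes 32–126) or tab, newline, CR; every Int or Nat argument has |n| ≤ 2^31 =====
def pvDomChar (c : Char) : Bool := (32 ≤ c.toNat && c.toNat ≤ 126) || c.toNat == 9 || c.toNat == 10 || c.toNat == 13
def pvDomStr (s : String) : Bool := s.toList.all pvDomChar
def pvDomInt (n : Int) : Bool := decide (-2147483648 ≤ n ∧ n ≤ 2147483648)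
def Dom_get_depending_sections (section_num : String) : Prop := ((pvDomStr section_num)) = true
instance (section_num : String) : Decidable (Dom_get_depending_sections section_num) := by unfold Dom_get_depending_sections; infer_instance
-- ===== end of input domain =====

-- B replaces A's running accumulator + insert(0) loop by a direct comprehension of joined prefixes (simpler decomposition, same cost).

-- ===== PORT A =====
-- 'section_num.isnumeric()' is ported as PySem.Str.strIsdigit: on Dom (ASCII) isnumeric and isdigit coincide.
def get_depending_sections (section_num : String) : List String :=
  if !(PySem.Str.isIn "_" section_num) && PySem.Str.strIsdigit section_num then
    [section_num]
  else
    let parts := PySem.Chars.splitOn section_num.toList ['_']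
    (parts.foldl
      (fun (st : List String × List Char) part =>
        let current := PySem.Chars.stripChars (st.2 ++ ['_'] ++ part) ['_']
        (String.ofList current :: st.1, current))
      (([] : List String), ([] : List Char))).1

-- ===== PORT B =====
def get_depending_sections_alt (section_num : String) : List String :=
  let parts := PySem.Chars.splitOn section_num.toList ['_']
  (PySem.List.pyRange (parts.length : Int) 0 (-1)).map
    (fun i => String.ofList (PySem.Chars.join ['_']
      ((PySem.List.slice parts none (some i)).filter (fun p => !p.isEmpty))))

-- ===== PRECONDITION & SPEC =====
def Spec_get_depending_sections (section_num : String) (out : List String) : Prop := out = get_depending_sections_alt section_num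
instance (section_num : String) (out : List String) : Decidable (Spec_get_depending_sections section_num out) := by unfold Spec_get_depending_sections; infer_instance

-- ===== CLAIM (what is proved, stated in full; the proofs are below) =====
def Claim_equal_get_depending_sections : Prop := ∀ (section_num : String), Dom_get_depending_sections section_num → Spec_get_depending_sections section_num (get_depending_sections section_num)

-- ===== LEMMAS AND PROOFS =====

-- simple recursive model of Python's split("_")
def pvSplit (pre : List Char) : List Char → List (List Char)
  | [] => [pre]
  | c :: rest => if c = '_' then pre :: pvSplit [] rest else pvSplit (pre ++ [c]) rest

theorem pvSplit_go_eq (l : List Char) : ∀ (fuel : Nat) (cur : List Char) (acc : List (List Char)),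
    l.length ≤ fuel →
    PySem.Chars.splitOn.go ['_'] fuel l cur acc = acc.reverse ++ pvSplit cur.reverse l := by
  induction l with
  | nil =>
    intro fuel cur acc _
    cases fuel <;> simp [PySem.Chars.splitOn.go, pvSplit]
  | cons c rest ih =>
    intro fuel cur acc hl
    cases fuel with
    | zero => simp at hl
    | succ f =>
      by_cases hc : c = '_'
      · subst hc
        rw [show PySem.Chars.splitOn.go ['_'] (f+1) ('_' :: rest) cur acc
              = PySem.Chars.splitOn.go ['_'] f rest [] (cur.reverse :: acc) by
            simp [PySem.Chars.splitOn.go, List.isPrefixOf]]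
        rw [ih f [] (cur.reverse :: acc) (by simpa using hl)]
        simp [pvSplit]
      · rw [show PySem.Chars.splitOn.go ['_'] (f+1) (c :: rest) cur acc
              = PySem.Chars.splitOn.go ['_'] f rest (c :: cur) acc by
            simp only [PySem.Chars.splitOn.go, List.isPrefixOf]
            rw [if_neg]
            simp only [Bool.and_eq_true, beq_iff_eq]
            exact fun h => hc h.1.symm]
        rw [ih f (c :: cur) acc (by simpa using hl)]
        simp [pvSplit, hc]

theorem splitOn_eq (cs : List Char) : PySem.Chars.splitOn cs ['_'] = pvSplit [] cs := by
  rw [PySem.Chars.splitOn, pvSplit_go_eq cs (cs.length + 1) [] [] (by omega)]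
  simp

theorem pvSplit_no_sep (l : List Char) : ∀ pre, '_' ∉ l → pvSplit pre l = [pre ++ l] := by
  induction l with
  | nil => intro pre _; simp [pvSplit]
  | cons c rest ih =>
    intro pre h
    have hc : ¬ c = '_' := fun e => h (by simp [e])
    rw [pvSplit, if_neg hc, ih (pre ++ [c]) (fun hm => h (by simp [hm]))]
    simp

theorem pvSplit_mem (l : List Char) : ∀ pre q, '_' ∉ pre → q ∈ pvSplit pre l → '_' ∉ q := by
  induction l with
  | nil => intro pre q hpre hq; simp [pvSplit] at hq; simpa [hq] using hpre
  | cons c rest ih =>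
    intro pre q hpre hq
    by_cases hc : c = '_'
    · subst hc
      rw [pvSplit, if_pos rfl] at hq
      rcases List.mem_cons.mp hq with h | h
      · simpa [h] using hpre
      · exact ih [] q (by simp) h
    · rw [pvSplit, if_neg hc] at hq
      exact ih (pre ++ [c]) q (by simp only [List.mem_append, List.mem_singleton, not_or]; exact ⟨hpre, fun e => hc e.symm⟩) hq

-- the joined prefix form
def pvJ (l : List (List Char)) : List Char :=
  PySem.Chars.join ['_'] (l.filter (fun p => !p.isEmpty))

theorem dw_no (s : List Char) (h : '_' ∉ s) :
    List.dropWhile (fun c => (['_'] : List Char).contains c) s = s := by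
  cases s with
  | nil => rfl
  | cons c rest =>
    rw [List.dropWhile_cons, if_neg]
    simp only [List.contains_eq_mem, List.mem_singleton, decide_eq_true_eq]
    exact fun e => h (by simp [e])

theorem join_append_singleton (xs : List (List Char)) (p : List Char) (h : xs ≠ []) :
    PySem.Chars.join ['_'] (xs ++ [p]) = PySem.Chars.join ['_'] xs ++ ['_'] ++ p := by
  induction xs with
  | nil => exact absurd rfl h
  | cons a t ih =>
    cases t with
    | nil => simp [PySem.Chars.join_cons_cons, PySem.Chars.join_singleton]
    | cons b t' =>
      simp only [List.cons_append]
      rw [PySem.Chars.join_cons_cons]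
      simp only [List.cons_append] at ih
      rw [ih (by simp), PySem.Chars.join_cons_cons]
      simp

-- every kept piece is nonempty and '_'-free
theorem pvJ_pieces (acc : List (List Char)) (h : ∀ p ∈ acc, '_' ∉ p) :
    ∀ q ∈ acc.filter (fun p => !p.isEmpty), q ≠ [] ∧ '_' ∉ q := by
  intro q hq
  rw [List.mem_filter] at hq
  exact ⟨by simpa using hq.2, h q hq.1⟩

theorem join_pieces_ne_nil (xs : List (List Char)) (hx : ∀ q ∈ xs, q ≠ []) (hne : xs ≠ []) :
    PySem.Chars.join ['_'] xs ≠ [] := by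
  cases xs with
  | nil => exact absurd rfl hne
  | cons a t =>
    cases t with
    | nil => simpa [PySem.Chars.join_singleton] using hx a (by simp)
    | cons b t' =>
      rw [PySem.Chars.join_cons_cons]
      have := hx a (by simp)
      intro e
      rcases List.append_eq_nil_iff.mp e with ⟨e1, _⟩
      rcases List.append_eq_nil_iff.mp e1 with ⟨e2, _⟩
      exact this e2

theorem join_edges (xs : List (List Char)) (hx : ∀ q ∈ xs, q ≠ [] ∧ '_' ∉ q) :
    (PySem.Chars.join ['_'] xs).head? ≠ some '_' ∧
      (PySem.Chars.join ['_'] xs).getLast? ≠ some '_' := by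
  induction xs with
  | nil => simp [PySem.Chars.join_nil]
  | cons a t ih =>
    obtain ⟨ha, ha'⟩ := hx a (by simp)
    cases t with
    | nil =>
      rw [PySem.Chars.join_singleton]
      constructor
      · intro e; exact ha' (List.mem_of_mem_head? e)
      · intro e; exact ha' (List.mem_of_getLast? e)
    | cons b t' =>
      have iht := ih (fun q hq => hx q (by simp [hq]))
      rw [PySem.Chars.join_cons_cons]
      constructor
      · rw [List.append_assoc, List.head?_append_of_ne_nil _ ha]
        intro e; exact ha' (List.mem_of_mem_head? e)
      · have hj : PySem.Chars.join ['_'] (b :: t') ≠ [] :=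
          join_pieces_ne_nil _ (fun q hq => (hx q (by simp [hq])).1) (by simp)
        rw [List.getLast?_append_of_ne_nil _ hj]
        exact iht.2

theorem pvJ_edges (acc : List (List Char)) (h : ∀ p ∈ acc, '_' ∉ p) :
    (pvJ acc).head? ≠ some '_' ∧ (pvJ acc).getLast? ≠ some '_' :=
  join_edges _ (pvJ_pieces acc h)

theorem pvJ_nil_iff (acc : List (List Char)) :
    pvJ acc = [] ↔ acc.filter (fun p => !p.isEmpty) = [] := by
  constructor
  · intro h
    by_contra hne
    exact join_pieces_ne_nil _
      (fun q hq => by simpa using (List.mem_filter.mp hq).2) hne h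
  · intro h; rw [pvJ, h, PySem.Chars.join_nil]

theorem dw_edge (s : List Char) (h : s.head? ≠ some '_') :
    List.dropWhile (fun c => (['_'] : List Char).contains c) s = s := by
  cases s with
  | nil => rfl
  | cons c rest =>
    rw [List.dropWhile_cons, if_neg]
    simp only [List.contains_eq_mem, List.mem_singleton, decide_eq_true_eq]
    intro e; exact h (by simp [e])

-- the key step: one iteration of A's loop produces the next joined prefix
theorem step_eq (acc : List (List Char)) (p : List Char)
    (hacc : ∀ q ∈ acc, '_' ∉ q) (hp : '_' ∉ p) :
    PySem.Chars.stripChars (pvJ acc ++ ['_'] ++ p) ['_'] = pvJ (acc ++ [p]) := by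
  by_cases hf : acc.filter (fun p => !p.isEmpty) = []
  · have hJ : pvJ acc = [] := (pvJ_nil_iff acc).mpr hf
    rw [hJ]
    have h1 : PySem.Chars.stripChars (([] : List Char) ++ ['_'] ++ p) ['_'] = p := by
      rw [PySem.Chars.stripChars]
      simp only [List.nil_append, List.singleton_append, List.dropWhile_cons]
      rw [if_pos (by simp), dw_no p hp, dw_no p.reverse (by simpa using hp),
        List.reverse_reverse]
    rw [h1, pvJ, List.filter_append, hf, List.nil_append]
    by_cases hp0 : p = []
    · simp [hp0, PySem.Chars.join_nil]
    · simp [hp0, PySem.Chars.join_singleton]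
  · have hne : pvJ acc ≠ [] := fun e => hf ((pvJ_nil_iff acc).mp e)
    obtain ⟨hh, hl⟩ := pvJ_edges acc hacc
    by_cases hp0 : p = []
    · subst hp0
      have hL : PySem.Chars.stripChars (pvJ acc ++ ['_'] ++ []) ['_'] = pvJ acc := by
        rw [List.append_nil, PySem.Chars.stripChars]
        rw [dw_edge (pvJ acc ++ ['_']) (by rw [List.head?_append_of_ne_nil _ hne]; exact hh)]
        rw [List.reverse_append]
        simp only [List.reverse_cons, List.reverse_nil, List.nil_append, List.singleton_append]
        rw [List.dropWhile_cons, if_pos (by simp)]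
        rw [dw_edge _ (by rw [List.head?_reverse]; exact hl), List.reverse_reverse]
      rw [hL]
      simp [pvJ, List.filter_append]
    · have hs : (pvJ acc ++ ['_'] ++ p).head? ≠ some '_' := by
        rw [List.append_assoc, List.head?_append_of_ne_nil _ hne]; exact hh
      have hs2 : (pvJ acc ++ ['_'] ++ p).reverse.head? ≠ some '_' := by
        rw [List.head?_reverse, List.getLast?_append_of_ne_nil _ hp0]
        intro e; exact hp (List.mem_of_getLast? e)
      have hL : PySem.Chars.stripChars (pvJ acc ++ ['_'] ++ p) ['_'] =
          pvJ acc ++ ['_'] ++ p := by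
        rw [PySem.Chars.stripChars, dw_edge _ hs, dw_edge _ hs2, List.reverse_reverse]
      rw [hL]
      conv_rhs => rw [pvJ, List.filter_append]
      rw [show ([p] : List (List Char)).filter (fun p => !p.isEmpty) = [p] by simp [hp0]]
      rw [join_append_singleton _ _ hf]
      rfl

-- the results list A builds, as a recursor
def pvRev (acc : List (List Char)) : List (List Char) → List String
  | [] => []
  | p :: l => pvRev (acc ++ [p]) l ++ [String.ofList (pvJ (acc ++ [p]))]

theorem foldA (l : List (List Char)) : ∀ (acc : List (List Char)) (rs : List String),
    (∀ q ∈ acc, '_' ∉ q) → (∀ q ∈ l, '_' ∉ q) →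
    l.foldl
      (fun (st : List String × List Char) part =>
        let current := PySem.Chars.stripChars (st.2 ++ ['_'] ++ part) ['_']
        (String.ofList current :: st.1, current))
      (rs, pvJ acc) = (pvRev acc l ++ rs, pvJ (acc ++ l)) := by
  induction l with
  | nil => intro acc rs _ _; simp [pvRev]
  | cons x t ih =>
    intro acc rs hacc hl
    rw [List.foldl_cons]
    simp only [step_eq acc x hacc (hl x (by simp))]
    rw [ih (acc ++ [x]) _
      (by
        intro r hr
        rcases List.mem_append.mp hr with h | h
        · exact hacc r h
        · rw [List.mem_singleton] at h; rw [h]; exact hl x (by simp))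
      (fun r hr => hl r (by simp [hr]))]
    simp [pvRev, List.append_assoc]

theorem pvRev_eq (l : List (List Char)) : ∀ acc,
    pvRev acc l = (List.range l.length).map
      (fun k => String.ofList (pvJ (acc ++ l.take (l.length - k)))) := by
  induction l with
  | nil => intro acc; simp [pvRev]
  | cons p t ih =>
    intro acc
    rw [pvRev, ih (acc ++ [p]), List.length_cons, List.range_succ, List.map_append]
    congr 1
    · apply List.map_congr_left
      intro k hk
      rw [List.mem_range] at hk
      have h1 : t.length + 1 - k = (t.length - k) + 1 := by omega
      rw [h1, List.take_succ_cons]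
      simp [List.append_assoc]
    · have h1 : t.length + 1 - t.length = 1 := by omega
      simp [h1]

theorem alt_eq (section_num : String) :
    get_depending_sections_alt section_num =
      (List.range (PySem.Chars.splitOn section_num.toList ['_']).length).map
        (fun k => String.ofList (pvJ ((PySem.Chars.splitOn section_num.toList ['_']).take
          ((PySem.Chars.splitOn section_num.toList ['_']).length - k)))) := by
  rw [get_depending_sections_alt, PySem.List.pyRange_neg_one]
  rw [List.map_map]
  apply List.map_congr_left
  intro k hk
  rw [List.mem_range, Int.sub_zero, Int.toNat_natCast] at hk
  have h1 : ((PySem.Chars.splitOn section_num.toList ['_']).length : Int) - (k : Int)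
      = (((PySem.Chars.splitOn section_num.toList ['_']).length - k : Nat) : Int) := by omega
  simp only [Function.comp_apply, h1]
  rw [PySem.List.slice_to _ (Int.natCast_nonneg _), Int.toNat_natCast]
  rfl

-- ===== VERDICT (by name: the statement is the Claim_ definition above) =====
theorem get_depending_sections_spec : Claim_equal_get_depending_sections := by
  intro s _
  unfold Spec_get_depending_sections
  rw [get_depending_sections]
  split
  · next h =>
    rw [Bool.and_eq_true, Bool.not_eq_eq_eq_not, Bool.not_true] at h
    obtain ⟨h1, h2⟩ := h
    have hni : '_' ∉ s.toList := by
      rw [PySem.Str.isIn_eq] at h1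
      have := (PySem.Chars.isIn_eq_false_iff _ _).mp h1
      intro hm
      exact this ((List.singleton_infix_iff _ _).mpr (by simpa using hm))
    have hsplit : PySem.Chars.splitOn s.toList ['_'] = [s.toList] := by
      rw [splitOn_eq, pvSplit_no_sep _ [] hni]; simp
    have hne : s.toList ≠ [] := by
      rw [PySem.Str.strIsdigit_eq, PySem.Chars.strIsdigit, Bool.and_eq_true] at h2
      simpa using h2.1
    rw [alt_eq, hsplit]
    simp [pvJ, hne, PySem.Chars.join_singleton, String.ofList_toList]
  · have hparts : ∀ q ∈ PySem.Chars.splitOn s.toList ['_'], '_' ∉ q := by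
      rw [splitOn_eq]
      exact fun q hq => pvSplit_mem _ [] q (by simp) hq
    have h0 : (([] : List String), ([] : List Char))
        = (([] : List String), pvJ []) := by simp [pvJ, PySem.Chars.join_nil]
    show (List.foldl
        (fun (st : List String × List Char) part =>
          let current := PySem.Chars.stripChars (st.2 ++ ['_'] ++ part) ['_']
          (String.ofList current :: st.1, current))
        (([] : List String), ([] : List Char)) (PySem.Chars.splitOn s.toList ['_'])).1
      = get_depending_sections_alt s
    rw [h0, foldA _ [] [] (by simp) hparts, alt_eq]
    simp only [List.append_nil]
    rw [pvRev_eq _ []]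
    simp
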